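-- pv_equiv track=rewrite | github.com/WeiXia-0000/ai-shortdrama-agent | ai_manga_factory/carry_structured_refresh.py | _overlap_substring
-- ===== SOURCE A (Python) =====
-- def _overlap_substring(a: str, b: str, min_len: int = 8) -> bool:
--     if len(a) < min_len or len(b) < min_len:
--         return bool(a and a in b) or bool(b and b in a)
--     for i in range(0, len(a) - min_len + 1):
--         chunk = a[i : i + min_len]
--         if chunk in b:
--             return True
--     return False
-- ===== SOURCE B (Python) =====
-- def _windows(s, k):
--     return {s[i : i + k] for i in range(len(s) - k + 1)}
--
-- def _overlap_substring(a: str, b: str, min_len: int = 8) -> bool: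
--     if len(a) < min_len or len(b) < min_len:
--         return bool(a and a in b) or bool(b and b in a)
--     if min_len <= 0:
--         return True  # the empty window is common to any two strings
--     return not _windows(a, min_len).isdisjoint(_windows(b, min_len))
-- ===== Notes on version B (the rewrite author's own statement) =====
-- stated objective: alternative
-- what changed: B collects the fixed-length windows of each string into a hash set once and tests the two sets for a common element (with a trivial fast path for min_len <= 0), instead of A's loop over a's windows with a full substring search inside b for each window.
import Mathlib
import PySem

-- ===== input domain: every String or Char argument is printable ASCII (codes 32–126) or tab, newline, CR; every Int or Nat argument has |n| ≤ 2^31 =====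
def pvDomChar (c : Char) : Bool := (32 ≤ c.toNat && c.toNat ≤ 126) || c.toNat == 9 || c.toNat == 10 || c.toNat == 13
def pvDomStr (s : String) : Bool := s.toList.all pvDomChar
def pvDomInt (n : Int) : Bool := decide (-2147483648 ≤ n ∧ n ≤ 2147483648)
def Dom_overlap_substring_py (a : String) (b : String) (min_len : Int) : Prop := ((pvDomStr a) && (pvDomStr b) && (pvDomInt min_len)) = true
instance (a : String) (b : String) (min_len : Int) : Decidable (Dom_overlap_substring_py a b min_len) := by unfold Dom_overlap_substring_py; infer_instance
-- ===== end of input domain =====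

-- B replaces A's window scan + substring search per window by collecting the fixed-length
-- windows of both strings into sets and testing the sets for a common element (alternative algorithm).

-- ===== PORT A =====
-- A's 'for i in range(0, len(a)-min_len+1): if a[i:i+min_len] in b: return True / return False',
-- as the same early-exit loop over the same indices
def pvLoopA (as_ bs : List Char) (m i : Int) : Bool :=
  if h : i < (as_.length : Int) - m + 1 then
    if PySem.Chars.isIn (PySem.List.slice as_ (some i) (some (i + m))) bs then true
    else pvLoopA as_ bs m (i + 1)
  else false
termination_by ((as_.length : Int) - m + 1 - i).toNat
decreasing_by omega

def overlap_substring_py (a : String) (b : String) (min_len : Int) : Bool :=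
  let as_ := a.toList
  let bs := b.toList
  if ((as_.length : Int) < min_len || (bs.length : Int) < min_len) then
    (!as_.isEmpty && PySem.Chars.isIn as_ bs) || (!bs.isEmpty && PySem.Chars.isIn bs as_)
  else
    pvLoopA as_ bs min_len 0

-- ===== PORT B =====
-- B's '_windows(s, k)' helper: the set of windows s[i:i+k]
def pvWindows (s : List Char) (k : Int) : PySem.Set (List Char) :=
  PySem.Set.ofList ((PySem.List.pyRange 0 ((s.length : Int) - k + 1) 1).map
    (fun i => PySem.List.slice s (some i) (some (i + k))))

def overlap_substring_py_alt (a : String) (b : String) (min_len : Int) : Bool :=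
  let as_ := a.toList
  let bs := b.toList
  if ((as_.length : Int) < min_len || (bs.length : Int) < min_len) then
    (!as_.isEmpty && PySem.Chars.isIn as_ bs) || (!bs.isEmpty && PySem.Chars.isIn bs as_)
  else if min_len ≤ 0 then true
  else
    -- 'not wa.isdisjoint(wb)' ported by hand, exactly: isdisjoint = every element of wa absent from wb
    !((pvWindows as_ min_len).all (fun s => !(PySem.Set.contains (pvWindows bs min_len) s)))

-- ===== PRECONDITION & SPEC =====
def Spec_overlap_substring_py (a : String) (b : String) (min_len : Int) (out : Bool) : Prop := out = overlap_substring_py_alt a b min_len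
instance (a : String) (b : String) (min_len : Int) (out : Bool) : Decidable (Spec_overlap_substring_py a b min_len out) := by unfold Spec_overlap_substring_py; infer_instance

-- ===== CLAIM (what is proved, stated in full; the proofs are below) =====
def Claim_equal_overlap_substring_py : Prop := ∀ (a : String) (b : String) (min_len : Int), Dom_overlap_substring_py a b min_len → Spec_overlap_substring_py a b min_len (overlap_substring_py a b min_len)

-- ===== LEMMAS AND PROOFS =====

-- A's loop from index i returns True iff some later in-range window is a substring of b
lemma pv_loopA_iff (as_ bs : List Char) (m : Int) :
    ∀ (n : Nat) (i : Int), ((as_.length : Int) - m + 1 - i).toNat = n →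
      (pvLoopA as_ bs m i = true ↔
        ∃ j : Int, i ≤ j ∧ j < (as_.length : Int) - m + 1 ∧
          PySem.Chars.isIn (PySem.List.slice as_ (some j) (some (j + m))) bs = true) := by
  intro n
  induction n with
  | zero =>
    intro i hi
    rw [pvLoopA, dif_neg (by omega)]
    simp only [Bool.false_eq_true, false_iff, not_exists]
    intro j h
    omega
  | succ n ih =>
    intro i hi
    rw [pvLoopA, dif_pos (by omega)]
    by_cases hp : PySem.Chars.isIn (PySem.List.slice as_ (some i) (some (i + m))) bs = true
    · simp only [hp, if_true, true_iff]
      exact ⟨i, le_rfl, by omega, hp⟩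
    · simp only [hp, Bool.false_eq_true, if_false]
      rw [ih (i + 1) (by omega)]
      constructor
      · rintro ⟨j, h1, h2, h3⟩
        exact ⟨j, by omega, h2, h3⟩
      · rintro ⟨j, h1, h2, h3⟩
        refine ⟨j, ?_, h2, h3⟩
        rcases eq_or_lt_of_le h1 with rfl | h
        · exact absurd h3 hp
        · omega

-- a window slice with nonnegative start and nonnegative length is take-of-drop
lemma pv_window_eq (xs : List Char) (m i : Int) (h0 : 0 ≤ i) (hm : 0 ≤ m) :
    PySem.List.slice xs (some i) (some (i + m)) = (xs.drop i.toNat).take m.toNat := by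
  rw [PySem.List.slice_toNat xs h0 (by omega : (0:Int) ≤ i + m)]
  congr 1
  omega

lemma pv_window_len (xs : List Char) (mN k : Nat) (h : k + mN ≤ xs.length) :
    ((xs.drop k).take mN).length = mN := by
  simp
  omega

-- substring containment of a length-mN string is existence of an equal length-mN window
lemma pv_isIn_iff_window (c bs : List Char) (mN : Nat) (h1 : 1 ≤ mN) (hc : c.length = mN) :
    (PySem.Chars.isIn c bs = true) ↔ ∃ j : Nat, j + mN ≤ bs.length ∧ (bs.drop j).take mN = c := by
  constructor
  · intro h
    obtain ⟨j, hj⟩ := (PySem.Chars.exists_prefix_drop_iff_isIn c bs).mpr h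
    have hlen : c.length ≤ (bs.drop j).length := hj.length_le
    simp only [List.length_drop, hc] at hlen
    refine ⟨j, by omega, ?_⟩
    have := List.prefix_iff_eq_take.mp hj
    rw [← hc]
    exact this.symm
  · rintro ⟨j, hjle, hj⟩
    exact (PySem.Chars.exists_prefix_drop_iff_isIn c bs).mp ⟨j, hj ▸ List.take_prefix _ _⟩

-- the positive-min_len main branches of the two ports agree
lemma pv_branch_eq (as_ bs : List Char) (m : Int) (hm : 0 < m) :
    pvLoopA as_ bs m 0
      = !((pvWindows as_ m).all (fun s => !(PySem.Set.contains (pvWindows bs m) s))) := by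
  rw [Bool.eq_iff_iff, pv_loopA_iff as_ bs m _ 0 rfl]
  unfold pvWindows
  simp only [Bool.not_eq_true', List.all_eq_false, Bool.not_eq_false,
    PySem.Set.contains_iff, PySem.Set.mem_ofList, List.mem_map, PySem.List.mem_pyRange_one]
  constructor
  · rintro ⟨i, hi0, hiu, hin⟩
    rw [pv_window_eq as_ m i hi0 (by omega)] at hin
    have hcl : ((as_.drop i.toNat).take m.toNat).length = m.toNat :=
      pv_window_len as_ m.toNat i.toNat (by omega)
    obtain ⟨j, hjb, hjeq⟩ := (pv_isIn_iff_window _ bs m.toNat (by omega) hcl).mp hin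
    refine ⟨(as_.drop i.toNat).take m.toNat, ⟨i, ⟨hi0, hiu⟩, pv_window_eq as_ m i hi0 (by omega)⟩,
      (j : Int), ⟨by omega, by omega⟩, ?_⟩
    rw [pv_window_eq bs m (j : Int) (by omega) (by omega)]
    simpa using hjeq
  · rintro ⟨s, ⟨i, ⟨hi0, hiu⟩, his⟩, j, ⟨hj0, hju⟩, hjs⟩
    refine ⟨i, hi0, hiu, ?_⟩
    rw [pv_window_eq as_ m i hi0 (by omega)] at his ⊢
    rw [pv_window_eq bs m j hj0 (by omega)] at hjs
    have hcl : s.length = m.toNat := by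
      rw [← his]
      exact pv_window_len as_ m.toNat i.toNat (by omega)
    rw [his]
    exact (pv_isIn_iff_window s bs m.toNat (by omega) hcl).mpr ⟨j.toNat, by omega, hjs⟩

-- ===== VERDICT (by name: the statement is the Claim_ definition above) =====
theorem overlap_substring_py_spec : Claim_equal_overlap_substring_py := by
  intro a b m _
  unfold Spec_overlap_substring_py overlap_substring_py overlap_substring_py_alt
  by_cases hg : (((a.toList.length : Int) < m || (b.toList.length : Int) < m) = true)
  · simp only [hg, if_true]
  · simp only [hg, Bool.false_eq_true, if_false]
    simp only [Bool.or_eq_true, decide_eq_true_eq, not_or] at hg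
    by_cases hm : m ≤ 0
    · rw [if_pos hm]
      rw [pv_loopA_iff a.toList b.toList m _ 0 rfl]
      refine ⟨-m, by omega, by omega, ?_⟩
      rw [neg_add_cancel, PySem.List.slice_toNat a.toList (by omega : (0:Int) ≤ -m) (le_refl (0:Int))]
      simp only [Int.toNat_zero, Nat.zero_sub, List.take_zero]
      exact PySem.Chars.isIn_nil b.toList
    · rw [if_neg hm]
      exact pv_branch_eq a.toList b.toList m (by omega)
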